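-- pv_equiv track=rewrite | github.com/talas9/tesla | odin/decompiled/src/scripting/jail.py | import_function_allowed
-- ===== SOURCE A (Python) =====
-- ALLOWED_MODULE_IMPORTS = [
--  "math",
--  "base64"]
--
-- ALLOWED_FUNCTION_IMPORTS = [
--  (
--   "asyncio", ['sleep', 'wait_for', 'TimeoutError', 'ensure_future', 'Event']),
--  (
--   "time", ["strftime", "time", "localtime"]),
--  (
--   "random", ["randint"])]
--
-- def import_module_allowed(module_name):
--     module_names = expand_module_name(module_name)
--     for name in module_names:
--         if name in ALLOWED_MODULE_IMPORTS:
--             return True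
--
--     return False
--
-- def import_function_allowed(module_name, from_list):
--     if import_module_allowed(module_name):
--         return True
--     else:
--         for from_module, allowed_functions in ALLOWED_FUNCTION_IMPORTS:
--             if module_name == from_module:
--                 if set(from_list).issubset(set(allowed_functions)):
--                     return True
--
--         return False
--
-- def expand_module_name(module_name):
--     names = []
--     tokens = module_name.split(".")
--     for i in range(0, len(tokens)):
--         names.append(".".join(tokens[:i + 1]))
--
--     return names
-- ===== SOURCE B (Python) =====
-- ALLOWED_MODULE_IMPORTS = [
--  "math",
--  "base64"]
--
-- ALLOWED_FUNCTION_IMPORTS = [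
--  (
--   "asyncio", ['sleep', 'wait_for', 'TimeoutError', 'ensure_future', 'Event']),
--  (
--   "time", ["strftime", "time", "localtime"]),
--  (
--   "random", ["randint"])]
--
-- def import_function_allowed(module_name, from_list):
--     for allowed in ALLOWED_MODULE_IMPORTS:
--         if module_name == allowed or module_name.startswith(allowed + "."):
--             return True
--     for from_module, allowed_functions in ALLOWED_FUNCTION_IMPORTS:
--         if module_name == from_module and all(f in allowed_functions for f in from_list):
--             return True
--     return False
-- ===== Notes on version B (the rewrite author's own statement) =====
-- stated objective: simpler
-- what changed: B tests the whitelist-prefix relation directly (module_name == allowed or module_name.startswith(allowed + '.')) instead of building the list of all dotted prefixes of module_name via split/join and searching it, and replaces the set-subset construction by a direct all(f in allowed_functions) scan.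
import Mathlib
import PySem

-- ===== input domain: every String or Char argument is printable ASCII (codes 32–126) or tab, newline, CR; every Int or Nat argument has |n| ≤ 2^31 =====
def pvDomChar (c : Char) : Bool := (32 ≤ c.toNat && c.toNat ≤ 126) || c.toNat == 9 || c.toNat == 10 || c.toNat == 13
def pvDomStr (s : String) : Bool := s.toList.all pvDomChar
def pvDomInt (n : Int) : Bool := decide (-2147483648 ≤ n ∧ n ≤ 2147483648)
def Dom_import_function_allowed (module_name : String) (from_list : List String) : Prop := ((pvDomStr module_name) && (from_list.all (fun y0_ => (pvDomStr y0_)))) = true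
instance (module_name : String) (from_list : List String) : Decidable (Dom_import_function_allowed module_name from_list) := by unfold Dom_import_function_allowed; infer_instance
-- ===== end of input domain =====

-- B replaces expand_module_name + prefix-list search by a direct "equal or startswith allowed+'.'" test
-- and the set-subset construction by a direct all-membership scan (objective: simpler).


-- ===== PORT A =====
def ALLOWED_MODULE_IMPORTS : List String := ["math", "base64"]

def ALLOWED_FUNCTION_IMPORTS : List (String × List String) :=
  [("asyncio", ["sleep", "wait_for", "TimeoutError", "ensure_future", "Event"]),
   ("time", ["strftime", "time", "localtime"]),
   ("random", ["randint"])]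

-- names = []; for i in range(0, len(tokens)): names.append(".".join(tokens[:i+1]))
def expand_module_name (module_name : String) : List String :=
  let tokens := (PySem.Str.split? module_name ".").getD []   -- sep "." ≠ "": split? is always some
  (PySem.List.pyRange 0 tokens.length 1).foldl
    (fun names i => names ++ [PySem.Str.join "." (PySem.List.slice tokens none (some (i + 1)))]) []

-- for name in module_names: if name in ALLOWED_MODULE_IMPORTS: return True / return False
def import_module_allowed (module_name : String) : Bool :=
  (expand_module_name module_name).any (fun name => ALLOWED_MODULE_IMPORTS.contains name)

def import_function_allowed (module_name : String) (from_list : List String) : Bool :=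
  if import_module_allowed module_name then true
  else
    ALLOWED_FUNCTION_IMPORTS.any (fun p =>
      module_name == p.1 &&
        PySem.Set.issubset (PySem.Set.ofList from_list) (PySem.Set.ofList p.2))

-- ===== PORT B =====
def import_function_allowed_alt (module_name : String) (from_list : List String) : Bool :=
  (ALLOWED_MODULE_IMPORTS.any (fun allowed =>
      module_name == allowed || PySem.Str.startswith module_name (allowed ++ "."))) ||
  (ALLOWED_FUNCTION_IMPORTS.any (fun p =>
      module_name == p.1 && from_list.all (fun f => p.2.contains f)))

-- ===== PRECONDITION & SPEC =====
def Spec_import_function_allowed (module_name : String) (from_list : List String) (out : Bool) : Prop := out = import_function_allowed_alt module_name from_list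
instance (module_name : String) (from_list : List String) (out : Bool) : Decidable (Spec_import_function_allowed module_name from_list out) := by unfold Spec_import_function_allowed; infer_instance

-- ===== CLAIM (what is proved, stated in full; the proofs are below) =====
def Claim_equal_import_function_allowed : Prop := ∀ (module_name : String) (from_list : List String), Dom_import_function_allowed module_name from_list → Spec_import_function_allowed module_name from_list (import_function_allowed module_name from_list)

-- ===== LEMMAS AND PROOFS =====

-- Reference single-separator split, structurally recursive.
def dotSplit (d : Char) (l : List Char) : List (List Char) :=
  match _h : l.dropWhile (· ≠ d) with
  | [] => [l.takeWhile (· ≠ d)]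
  | _ :: rest => l.takeWhile (· ≠ d) :: dotSplit d rest
termination_by l.length
decreasing_by
  have h2 : (l.dropWhile (· ≠ d)).length ≤ l.length := l.length_dropWhile_le _
  rw [_h] at h2; simp at h2 ⊢; omega

theorem dotSplit_nil (d : Char) : dotSplit d [] = [[]] := by
  unfold dotSplit; simp

theorem dotSplit_cons_eq (d : Char) (rest : List Char) :
    dotSplit d (d :: rest) = [] :: dotSplit d rest := by
  have hd : List.dropWhile (fun x => decide ¬x = d) (d :: rest) = d :: rest := by simp
  rw [dotSplit]
  split
  · simp_all
  · rename_i heq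
    rw [hd] at heq
    simp_all

theorem dotSplit_cons_ne (d c : Char) (rest : List Char) (h : c ≠ d) :
    dotSplit d (c :: rest) = (dotSplit d rest).modifyHead (c :: ·) := by
  have hd : List.dropWhile (fun x => decide ¬x = d) (c :: rest) =
      List.dropWhile (fun x => decide ¬x = d) rest := by simp [h]
  have ht : List.takeWhile (fun x => decide ¬x = d) (c :: rest) =
      c :: List.takeWhile (fun x => decide ¬x = d) rest := by simp [h]
  rw [dotSplit]
  conv_rhs => rw [dotSplit]
  split <;> rename_i heq <;> rw [hd] at heq <;> rw [heq] <;> simp [h]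

theorem dotSplit_ne_nil (d : Char) (l : List Char) : dotSplit d l ≠ [] := by
  unfold dotSplit; split <;> simp

theorem go_eq (d : Char) (fuel : Nat) :
    ∀ (l cur : List Char) (accs : List (List Char)), l.length < fuel →
      PySem.Chars.splitOn.go [d] fuel l cur accs =
        accs.reverse ++ (dotSplit d l).modifyHead (cur.reverse ++ ·) := by
  induction fuel with
  | zero => intro l cur accs h; omega
  | succ n ih =>
    intro l cur accs h
    match l with
    | [] => simp [PySem.Chars.splitOn.go, dotSplit_nil]
    | c :: rest =>
      by_cases hc : c = d
      · subst hc
        have hpre : [c].isPrefixOf (c :: rest) = true := by simp [List.isPrefixOf]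
        have hrec := ih rest [] (cur.reverse :: accs) (by simp at h; omega)
        simp only [PySem.Chars.splitOn.go]
        rw [if_pos hpre]
        rw [show List.drop [c].length (c :: rest) = rest from rfl]
        rw [hrec, dotSplit_cons_eq]
        simp
        cases dotSplit c rest <;> simp
      · have hpre : ¬ ([d].isPrefixOf (c :: rest) = true) := by
          simp [List.isPrefixOf]
          intro hh; exact absurd hh.symm hc
        have hrec := ih rest (c :: cur) accs (by simp at h; omega)
        simp only [PySem.Chars.splitOn.go]
        rw [if_neg hpre]
        rw [hrec, dotSplit_cons_ne d c rest hc]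
        rcases hds : dotSplit d rest with _ | ⟨a, as⟩
        · exact absurd hds (dotSplit_ne_nil d rest)
        · simp

theorem splitOn_eq_dotSplit (d : Char) (l : List Char) :
    PySem.Chars.splitOn l [d] = dotSplit d l := by
  unfold PySem.Chars.splitOn
  rw [go_eq d (l.length + 1) l [] [] (by omega)]
  cases dotSplit d l <;> simp

theorem dotSplit_head (d : Char) (l : List Char) :
    ∃ ts, dotSplit d l = (l.takeWhile (fun c => decide (c ≠ d))) :: ts := by
  unfold dotSplit
  split
  · exact ⟨[], rfl⟩
  · exact ⟨_, rfl⟩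

theorem head_dropWhile_ne (d head : Char) (x rest : List Char)
    (h : List.dropWhile (fun x => decide (x ≠ d)) x = head :: rest) : head = d := by
  induction x with
  | nil => simp at h
  | cons a t ih =>
    by_cases ha : a = d
    · rw [List.dropWhile_cons] at h
      simp [ha] at h
      exact h.1.symm
    · rw [List.dropWhile_cons] at h
      have hd : (decide (a ≠ d)) = true := by simp [ha]
      rw [hd] at h
      simp only [if_true] at h
      exact ih h

theorem tw_app (d : Char) (xs r : List Char) (hxs : ∀ c ∈ xs, c ≠ d) :
    (xs ++ d :: r).takeWhile (fun c => decide (c ≠ d)) = xs := by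
  induction xs with
  | nil => simp
  | cons x xt ih =>
    have hx : x ≠ d := hxs x (by simp)
    have hih := ih (fun c hc => hxs c (by simp [hc]))
    simp only [List.cons_append, List.takeWhile_cons]
    simp at hih ⊢
    simp [hx, hih]

theorem foldl_append_map {A B : Type} (f : A → B) (l : List A) (acc : List B) :
    l.foldl (fun ns i => ns ++ [f i]) acc = acc ++ l.map f := by
  induction l generalizing acc with
  | nil => simp
  | cons x xs ih => simp [ih]

theorem expand_eq (s : String) :
    expand_module_name s
      = (List.range (dotSplit '.' s.toList).length).map
          (fun k => String.ofList (PySem.Chars.join ['.'] ((dotSplit '.' s.toList).take (k + 1)))) := by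
  have hsplit : (PySem.Str.split? s ".").getD []
      = (dotSplit '.' s.toList).map String.ofList := by
    unfold PySem.Str.split? PySem.Chars.split?
    rw [show ".".toList = ['.'] from rfl, splitOn_eq_dotSplit]
    simp
  unfold expand_module_name
  simp only [hsplit]
  rw [foldl_append_map, List.nil_append, List.length_map, PySem.List.pyRange_one, List.map_map]
  apply List.map_congr_left
  intro k hk
  simp only [List.mem_range] at hk
  simp only [Function.comp]
  rw [show ((0 : Int) + (k : Int)) + 1 = ((k + 1 : Nat) : Int) by push_cast; ring]
  rw [PySem.List.slice_to _ (by positivity)]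
  rw [Int.toNat_natCast]
  rw [← List.map_take]
  unfold PySem.Str.join
  rw [show ".".toList = ['.'] from rfl]
  congr 1
  congr 1
  rw [List.map_map]
  have hid : (String.toList ∘ String.ofList) = (id : List Char → List Char) := by
    funext l; simp
  rw [hid, List.map_id]

theorem key_mem (a : String) (hnd : ∀ c ∈ a.toList, c ≠ '.') (s : String) :
    (a ∈ expand_module_name s) ↔ (s = a ∨ a.toList ++ ['.'] <+: s.toList) := by
  rw [expand_eq]
  simp only [List.mem_map, List.mem_range]
  constructor
  · rintro ⟨k, hk, hka⟩
    match k with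
    | 0 =>
      obtain ⟨ts, hhead⟩ := dotSplit_head '.' s.toList
      rw [hhead] at hka
      simp only [List.take_succ_cons, List.take_zero] at hka
      rw [PySem.Chars.join_singleton] at hka
      have hta : a.toList = s.toList.takeWhile (fun c => decide (c ≠ '.')) := by
        rw [← hka, String.toList_ofList]
      rcases hdw : s.toList.dropWhile (fun c => decide (c ≠ '.')) with _ | ⟨x, r⟩
      · left
        apply String.toList_inj.mp
        rw [hta]
        conv_lhs => rw [← List.takeWhile_append_dropWhile
          (p := fun c => decide (c ≠ '.')) (l := s.toList)]
        rw [hdw, List.append_nil]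
      · right
        have hx : x = '.' := head_dropWhile_ne '.' x s.toList r hdw
        refine ⟨r, ?_⟩
        rw [hta]
        conv_rhs => rw [← List.takeWhile_append_dropWhile
          (p := fun c => decide (c ≠ '.')) (l := s.toList)]
        rw [hdw, hx, List.append_assoc]
        rfl
    | (k + 1) =>
      exfalso
      rcases hT : dotSplit '.' s.toList with _ | ⟨t0, tt⟩
      · exact absurd hT (dotSplit_ne_nil '.' s.toList)
      rcases tt with _ | ⟨t1, tt'⟩
      · rw [hT] at hk; simp at hk
      rw [hT] at hka
      simp only [List.take_succ_cons] at hka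
      rw [PySem.Chars.join_cons_cons] at hka
      have hdot : '.' ∈ a.toList := by
        rw [← hka, String.toList_ofList]
        simp
      exact hnd '.' hdot rfl
  · intro hcase
    have hL : 0 < (dotSplit '.' s.toList).length :=
      List.length_pos_iff.mpr (dotSplit_ne_nil '.' s.toList)
    refine ⟨0, hL, ?_⟩
    obtain ⟨ts, hhead⟩ := dotSplit_head '.' s.toList
    rw [hhead]
    simp only [List.take_succ_cons, List.take_zero]
    rw [PySem.Chars.join_singleton]
    have htw : s.toList.takeWhile (fun c => decide (c ≠ '.')) = a.toList := by
      rcases hcase with rfl | ⟨t, ht⟩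
      · apply List.takeWhile_eq_self_iff.mpr
        intro c hc
        simp [hnd c hc]
      · rw [← ht, List.append_assoc, show ['.'] ++ t = '.' :: t from rfl]
        exact tw_app '.' a.toList t hnd
    rw [htw, String.ofList_toList]

theorem subset_eq_all (xs ys : List String) :
    PySem.Set.issubset (PySem.Set.ofList xs) (PySem.Set.ofList ys)
      = xs.all (fun x => ys.contains x) := by
  rw [Bool.eq_iff_iff]
  simp [PySem.Set.issubset_iff, PySem.Set.mem_ofList, List.all_eq_true]

theorem hnd_math : ∀ c ∈ "math".toList, c ≠ '.' := by
  simp [show "math".toList = ['m','a','t','h'] from rfl]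

theorem hnd_base64 : ∀ c ∈ "base64".toList, c ≠ '.' := by
  simp [show "base64".toList = ['b','a','s','e','6','4'] from rfl]

theorem mod_eq (s : String) :
    import_module_allowed s
      = (ALLOWED_MODULE_IMPORTS.any (fun allowed =>
          s == allowed || PySem.Str.startswith s (allowed ++ "."))) := by
  rw [Bool.eq_iff_iff]
  simp only [import_module_allowed, ALLOWED_MODULE_IMPORTS, List.any_cons, List.any_nil,
    List.any_eq_true, List.contains_eq_mem, Bool.or_eq_true, Bool.or_false,
    beq_iff_eq, decide_eq_true_eq, PySem.Str.startswith_eq, PySem.Chars.startswith_iff,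
    String.toList_append]
  rw [show ".".toList = ['.'] from rfl]
  constructor
  · rintro ⟨x, hx, hm⟩
    simp only [List.mem_cons, List.not_mem_nil, or_false] at hm
    rcases hm with rfl | rfl
    · exact Or.inl ((key_mem "math" hnd_math s).mp hx)
    · exact Or.inr ((key_mem "base64" hnd_base64 s).mp hx)
  · rintro (h | h)
    · exact ⟨"math", (key_mem "math" hnd_math s).mpr h, by simp⟩
    · exact ⟨"base64", (key_mem "base64" hnd_base64 s).mpr h, by simp⟩

-- ===== VERDICT (by name: the statement is the Claim_ definition above) =====
theorem import_function_allowed_spec : Claim_equal_import_function_allowed := by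
  intro s fl _
  unfold Spec_import_function_allowed import_function_allowed import_function_allowed_alt
  rw [← mod_eq]
  by_cases h : import_module_allowed s
  · simp [h]
  · simp only [h, Bool.false_eq_true, if_false, Bool.false_or]
    simp only [ALLOWED_FUNCTION_IMPORTS, List.any_cons, List.any_nil, subset_eq_all]
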